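-- pv_equiv track=rewrite | github.com/ShovalShabi/Python | Generators, Lambda Expressions and List comprehensions/Question5.py | func
-- ===== SOURCE A (Python) =====
-- def func(n):
--     l=[]
--     for i in range(n):
--         j=0
--         while j<i:
--             if j%2 == 0:
--                 l.append(j+5)
--             elif j % 3 == 0:
--                 l.append(j // 2)
--             elif j%5 == 2:
--                 l.append(j)
--             j+=1
--     return l
-- ===== SOURCE B (Python) =====
-- def func(n):
--     # Single loop: output is the concatenation of growing prefixes of the
--     # contribution sequence; reuse the prefix instead of recomputing it.
--     result = []
--     prefix = []
--     for i in range(n):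
--         result.extend(prefix)
--         if i % 2 == 0:
--             prefix.append(i + 5)
--         elif i % 3 == 0:
--             prefix.append(i // 2)
--         elif i % 5 == 2:
--             prefix.append(i)
--     return result
-- ===== Notes on version B (the rewrite author's own statement) =====
-- stated objective: alternative
-- what changed: Replaced A's nested loops (rescanning j=0..i-1 for every i) with a single loop that maintains the running contribution prefix, extending the result with it and evaluating the if/elif cascade once per index.
import Mathlib
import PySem

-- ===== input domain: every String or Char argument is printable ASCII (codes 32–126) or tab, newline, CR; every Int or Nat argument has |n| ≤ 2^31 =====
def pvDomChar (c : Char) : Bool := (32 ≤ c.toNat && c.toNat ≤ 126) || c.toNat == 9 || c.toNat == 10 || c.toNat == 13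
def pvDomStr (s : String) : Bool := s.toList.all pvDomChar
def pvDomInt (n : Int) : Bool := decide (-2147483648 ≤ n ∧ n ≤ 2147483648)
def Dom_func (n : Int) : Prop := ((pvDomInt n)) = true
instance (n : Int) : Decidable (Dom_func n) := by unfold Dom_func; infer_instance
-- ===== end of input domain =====

-- B replaces A's nested rescan of j=0..i-1 with one loop reusing a running prefix list (objective: alternative decomposition, same output).

-- ===== PORT A =====
-- inner 'while j < i' loop of A, appending per the if/elif/elif cascade
def funcInner (i j : Int) : List Int :=
  if _h : j < i then
    (if PySem.Int.mod j 2 = 0 then [j + 5]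
     else if PySem.Int.mod j 3 = 0 then [PySem.Int.floordiv j 2]
     else if PySem.Int.mod j 5 = 2 then [j]
     else []) ++ funcInner i (j + 1)
  else []
termination_by (i - j).toNat
decreasing_by omega

def func (n : Int) : List Int :=
  (PySem.List.pyRange 0 n 1).foldl (fun l i => l ++ funcInner i 0) []

-- ===== PORT B =====
-- the single contribution of index i (the same cascade, evaluated once)
def funcContrib (i : Int) : List Int :=
  if PySem.Int.mod i 2 = 0 then [i + 5]
  else if PySem.Int.mod i 3 = 0 then [PySem.Int.floordiv i 2]
  else if PySem.Int.mod i 5 = 2 then [i]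
  else []

def func_alt (n : Int) : List Int :=
  ((PySem.List.pyRange 0 n 1).foldl
      (fun (st : List Int × List Int) i => (st.1 ++ st.2, st.2 ++ funcContrib i))
      ([], [])).1

-- ===== PRECONDITION & SPEC =====
def Spec_func (n : Int) (out : List Int) : Prop := out = func_alt n
instance (n : Int) (out : List Int) : Decidable (Spec_func n out) := by unfold Spec_func; infer_instance

-- ===== CLAIM (what is proved, stated in full; the proofs are below) =====
def Claim_equal_func : Prop := ∀ (n : Int), Dom_func n → Spec_func n (func n)

-- ===== LEMMAS AND PROOFS =====

-- A's inner while-loop is the concatenation of the per-index contributions over range j..i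
theorem funcInner_eq_flatMap (i j : Int) :
    funcInner i j = (PySem.List.pyRange j i 1).flatMap funcContrib := by
  by_cases h : j < i
  · rw [funcInner, dif_pos h, PySem.List.pyRange_one_cons h,
        funcInner_eq_flatMap i (j + 1)]
    simp [funcContrib, List.flatMap_cons]
  · rw [funcInner, dif_neg h, PySem.List.pyRange_one_eq_nil (by omega)]
    rfl
termination_by (i - j).toNat
decreasing_by omega

-- the joint invariant of B's fold, proved for natural upper bounds
theorem fold_invariant (k : Nat) :
    (PySem.List.pyRange 0 (k : Int) 1).foldl
        (fun (st : List Int × List Int) i => (st.1 ++ st.2, st.2 ++ funcContrib i))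
        ([], [])
      = ((PySem.List.pyRange 0 (k : Int) 1).foldl (fun l i => l ++ funcInner i 0) [],
         (PySem.List.pyRange 0 (k : Int) 1).flatMap funcContrib) := by
  induction k with
  | zero => rfl
  | succ m ih =>
      have hsplit : PySem.List.pyRange 0 ((m : Int) + 1) 1
          = PySem.List.pyRange 0 (m : Int) 1 ++ [(m : Int)] :=
        PySem.List.pyRange_one_succ_right (by omega)
      push_cast
      rw [hsplit]
      simp only [List.foldl_append, List.foldl_cons, List.foldl_nil, ih,
        List.flatMap_append, List.flatMap_cons, List.flatMap_nil, List.append_nil]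
      rw [funcInner_eq_flatMap]

-- ===== VERDICT (by name: the statement is the Claim_ definition above) =====
theorem func_spec : Claim_equal_func := by
  intro n _
  unfold Spec_func func func_alt
  by_cases h : n ≤ 0
  · rw [PySem.List.pyRange_one_eq_nil h]; rfl
  · obtain ⟨k, hk⟩ : ∃ k : Nat, n = (k : Int) := ⟨n.toNat, by omega⟩
    subst hk
    rw [fold_invariant k]
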